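-- pv_equiv track=rewrite | github.com/shals0r/locus | backend/app/services/skill_service.py | _parse_skill_md_frontmatter
-- ===== SOURCE A (Python) =====
-- def _parse_skill_md_frontmatter(lines: list[str]) -> tuple[str | None, str | None]:
--     """Parse name and description from YAML frontmatter of a SKILL.md file.
--
--     Returns (name, description) -- either may be None if not found.
--     """
--     name = None
--     description = None
--     in_frontmatter = False
--     for line in lines:
--         stripped = line.strip()
--         if stripped == "---":
--             if in_frontmatter:
--                 break  # end of frontmatter
--             in_frontmatter = True
--             continue
--         if not in_frontmatter:
--             continue
--         if stripped.startswith("name:"):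
--             name = stripped[5:].strip().strip("\"'")
--         elif stripped.startswith("description:"):
--             description = stripped[12:].strip().strip("\"'")
--     return name, description
-- ===== SOURCE B (Python) =====
-- def _parse_skill_md_frontmatter(lines: list[str]) -> tuple[str | None, str | None]:
--     """Parse name and description from YAML frontmatter of a SKILL.md file.
--
--     Boundary-find first, then a single parse over the isolated frontmatter region.
--     """
--     stripped = [l.strip() for l in lines]
--     try:
--         start = stripped.index("---")
--     except ValueError:
--         return None, None
--     tail = stripped[start + 1:]
--     try:
--         end = tail.index("---")
--     except ValueError:
--         end = len(tail)
--     name = None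
--     description = None
--     for s in tail[:end]:
--         if s.startswith("name:"):
--             name = s[5:].strip().strip("\"'")
--         elif s.startswith("description:"):
--             description = s[12:].strip().strip("\"'")
--     return name, description
-- ===== Notes on version B (the rewrite author's own statement) =====
-- stated objective: alternative
-- what changed: Replaced the flag-driven single pass with an explicit boundary search (index of the first and second '---' on pre-stripped lines) followed by a separate last-wins parse over only the isolated frontmatter slice.
import Mathlib
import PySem

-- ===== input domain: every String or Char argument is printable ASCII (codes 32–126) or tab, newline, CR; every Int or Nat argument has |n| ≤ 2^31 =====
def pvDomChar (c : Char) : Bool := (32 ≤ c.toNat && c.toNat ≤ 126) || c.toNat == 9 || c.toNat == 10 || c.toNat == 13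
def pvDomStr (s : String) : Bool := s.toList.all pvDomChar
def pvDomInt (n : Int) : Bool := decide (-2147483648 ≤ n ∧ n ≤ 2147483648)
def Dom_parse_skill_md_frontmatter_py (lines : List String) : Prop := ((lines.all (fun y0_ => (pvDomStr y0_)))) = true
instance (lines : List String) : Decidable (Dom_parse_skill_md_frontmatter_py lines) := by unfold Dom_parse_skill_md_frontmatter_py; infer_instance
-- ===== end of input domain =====

-- B replaces A's flag-driven single pass by an explicit search for the '---' delimiters
-- followed by a separate parse over the isolated slice; same cost, alternative decomposition.

-- stripped[k:].strip().strip("\"'") — shared by both Pythons' branch bodies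
def pvVal (stripped : String) (k : Int) : String :=
  PySem.Str.stripChars (PySem.Str.strip (PySem.Str.slice stripped (some k) none)) "\"'"

-- ===== PORT A =====
def pvA_loop : List String → Option String → Option String → Bool → Option String × Option String
  | [], name, desc, _ => (name, desc)
  | line :: rest, name, desc, infm =>
    let stripped := PySem.Str.strip line
    if stripped = "---" then
      if infm then (name, desc)
      else pvA_loop rest name desc true
    else if infm = false then pvA_loop rest name desc infm
    else if PySem.Str.startswith stripped "name:" then
      pvA_loop rest (some (pvVal stripped 5)) desc infm
    else if PySem.Str.startswith stripped "description:" then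
      pvA_loop rest name (some (pvVal stripped 12)) infm
    else pvA_loop rest name desc infm

def parse_skill_md_frontmatter_py (lines : List String) : Option String × Option String :=
  pvA_loop lines none none false

-- ===== PORT B =====
def pvB_parse : List String → Option String → Option String → Option String × Option String
  | [], name, desc => (name, desc)
  | s :: rest, name, desc =>
    if PySem.Str.startswith s "name:" then
      pvB_parse rest (some (pvVal s 5)) desc
    else if PySem.Str.startswith s "description:" then
      pvB_parse rest name (some (pvVal s 12))
    else
      pvB_parse rest name desc

-- parse the region between the delimiters: cut at the closing '---' (if any), last-wins scan
def pvB_body (tail : List String) : Option String × Option String :=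
  pvB_parse
    (match PySem.List.index? tail "---" with
     | none => tail
     | some e => PySem.List.slice tail none (some (e : Int)))
    none none

def parse_skill_md_frontmatter_py_alt (lines : List String) : Option String × Option String :=
  match PySem.List.index? (lines.map PySem.Str.strip) "---" with
  | none => (none, none)
  | some start =>
    pvB_body (PySem.List.slice (lines.map PySem.Str.strip) (some ((start : Int) + 1)) none)

-- ===== PRECONDITION & SPEC =====
def Spec_parse_skill_md_frontmatter_py (lines : List String) (out : Option String × Option String) : Prop := out = parse_skill_md_frontmatter_py_alt lines
instance (lines : List String) (out : Option String × Option String) : Decidable (Spec_parse_skill_md_frontmatter_py lines out) := by unfold Spec_parse_skill_md_frontmatter_py; infer_instance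

-- ===== CLAIM (what is proved, stated in full; the proofs are below) =====
def Claim_equal_parse_skill_md_frontmatter_py : Prop := ∀ (lines : List String), Dom_parse_skill_md_frontmatter_py lines → Spec_parse_skill_md_frontmatter_py lines (parse_skill_md_frontmatter_py lines)

-- ===== LEMMAS AND PROOFS =====

-- the frontmatter body: the stripped lines up to (excluding) the next '---'
def pvCut (ss : List String) : List String :=
  match PySem.List.index? ss "---" with
  | none => ss
  | some e => ss.take e

theorem pvCut_cons_self (ss : List String) : pvCut ("---" :: ss) = [] := by
  unfold pvCut; rw [PySem.List.index?_cons_self]; simp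

theorem pvCut_cons_ne (s : String) (ss : List String) (h : s ≠ "---") :
    pvCut (s :: ss) = s :: pvCut ss := by
  unfold pvCut
  rw [PySem.List.index?_cons_of_ne ss h]
  cases PySem.List.index? ss "---" <;> simp

-- inside the frontmatter, A's loop is B's parse of the cut region
theorem pvA_true_eq (xs : List String) :
    ∀ n d, pvA_loop xs n d true = pvB_parse (pvCut (xs.map PySem.Str.strip)) n d := by
  induction xs with
  | nil => intro n d; rfl
  | cons x xs ih =>
    intro n d
    by_cases h : PySem.Str.strip x = "---"
    · simp [pvA_loop, h, pvCut_cons_self, pvB_parse]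
    · rw [List.map_cons, pvCut_cons_ne _ _ h]
      simp only [pvA_loop, pvB_parse, h, if_false, ih]
      split_ifs <;> simp_all

-- B's result, rewritten as: skip to after the first '---', then parse the cut
theorem pvB_body_eq_cut (tail : List String) : pvB_body tail = pvB_parse (pvCut tail) none none := by
  unfold pvB_body pvCut
  cases he : PySem.List.index? tail "---" with
  | none => rfl
  | some e => simp [PySem.List.slice_to_natCast]

theorem pv_main (lines : List String) :
    parse_skill_md_frontmatter_py lines = parse_skill_md_frontmatter_py_alt lines := by
  unfold parse_skill_md_frontmatter_py
  induction lines with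
  | nil => rfl
  | cons x xs ih =>
    by_cases h : PySem.Str.strip x = "---"
    · -- opening delimiter: A flips the flag, B finds index 0
      have hA : pvA_loop (x :: xs) none none false = pvA_loop xs none none true := by
        simp [pvA_loop, h]
      rw [hA, pvA_true_eq]
      unfold parse_skill_md_frontmatter_py_alt
      rw [List.map_cons, h, PySem.List.index?_cons_self]
      have h1 : (((0 : Nat) : Int) + 1) = ((1 : Nat) : Int) := by norm_num
      simp only [h1, PySem.List.slice_from_natCast, pvB_body_eq_cut, List.drop_succ_cons,
        List.drop_zero]
    · -- line skipped by both: A stays out of frontmatter, B's indices all shift by one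
      have hA : pvA_loop (x :: xs) none none false = pvA_loop xs none none false := by
        simp [pvA_loop, h]
      rw [hA, ih]
      unfold parse_skill_md_frontmatter_py_alt
      rw [List.map_cons, PySem.List.index?_cons_of_ne _ h]
      cases hi : PySem.List.index? (xs.map PySem.Str.strip) "---" with
      | none => rfl
      | some i =>
        simp only [Option.map_some]
        have h1 : ((i : Int) + 1) = ((i + 1 : Nat) : Int) := by push_cast; ring
        have h2 : (((i + 1 : Nat) : Int) + 1) = ((i + 2 : Nat) : Int) := by push_cast; ring
        rw [h1, h2, PySem.List.slice_from_natCast, PySem.List.slice_from_natCast,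
          List.drop_succ_cons]

-- ===== VERDICT (by name: the statement is the Claim_ definition above) =====
theorem parse_skill_md_frontmatter_py_spec : Claim_equal_parse_skill_md_frontmatter_py := by
  intro lines _
  unfold Spec_parse_skill_md_frontmatter_py
  exact pv_main lines
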